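-- pv_equiv track=rewrite | github.com/williamdavignon/bars | csvFormatting/formatting.py | parentheseQuiFontChier
-- ===== SOURCE A (Python) =====
-- def parentheseQuiFontChier(villeParen):     ##et parenthèses
--     strArray = []
--     try:
--         villeParen.index("(")
--     except ValueError:
--         return(villeParen)
--     else :
--         ouvertePos = villeParen.find('(')
--         fermeePos = villeParen.find(')')
--         delRange = range(ouvertePos,fermeePos+1)
--         pos = 0
--         for char in villeParen:
--             if pos not in delRange:
--                 strArray.append(char)
--             pos +=1
--         villeParen ="".join(strArray)
--         return(villeParen)
-- ===== SOURCE B (Python) =====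
-- def parentheseQuiFontChier(villeParen):
--     ouvertePos = villeParen.find('(')
--     if ouvertePos == -1:
--         return villeParen
--     fermeePos = villeParen.find(')')
--     if fermeePos < ouvertePos:
--         return villeParen
--     return villeParen[:ouvertePos] + villeParen[fermeePos+1:]
-- ===== Notes on version B (the rewrite author's own statement) =====
-- stated objective: simpler
-- what changed: Replaces A's try/except index probe and per-character position-in-range filtering loop with two find calls and direct slicing villeParen[:ouvertePos] + villeParen[fermeePos+1:], guarding the empty-delRange case with fermeePos < ouvertePos.
import Mathlib
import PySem

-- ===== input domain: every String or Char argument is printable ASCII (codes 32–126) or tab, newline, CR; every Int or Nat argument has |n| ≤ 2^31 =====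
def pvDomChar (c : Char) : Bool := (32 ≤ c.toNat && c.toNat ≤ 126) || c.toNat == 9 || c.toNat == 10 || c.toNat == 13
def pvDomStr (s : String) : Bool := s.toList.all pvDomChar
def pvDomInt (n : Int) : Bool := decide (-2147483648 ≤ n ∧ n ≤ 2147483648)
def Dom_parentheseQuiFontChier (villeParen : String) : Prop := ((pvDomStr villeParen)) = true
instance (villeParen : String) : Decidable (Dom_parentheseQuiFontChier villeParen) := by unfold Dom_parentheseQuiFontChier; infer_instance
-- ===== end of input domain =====

-- B replaces A's per-character index-in-range loop with two find calls and direct slicing; objective: simpler.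

-- ===== PORT A =====
-- the loop body of A's 'for char in villeParen: if pos not in delRange: strArray.append(char); pos += 1'
def pvALoop (ouvertePos fermeePos : Int) (st : List Char × Nat) (char : Char) : List Char × Nat :=
  (if ¬ (ouvertePos ≤ (st.2 : Int) ∧ (st.2 : Int) < fermeePos + 1) then st.1 ++ [char] else st.1,
   st.2 + 1)

def parentheseQuiFontChier (villeParen : String) : String :=
  let strArray : List Char := []
  if PySem.Str.isIn "(" villeParen then
    let ouvertePos := PySem.Str.find villeParen "("
    let fermeePos := PySem.Str.find villeParen ")"
    let r := villeParen.toList.foldl (pvALoop ouvertePos fermeePos) (strArray, 0)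
    String.ofList r.1
  else
    villeParen

-- ===== PORT B =====
def parentheseQuiFontChier_alt (villeParen : String) : String :=
  let ouvertePos := PySem.Str.find villeParen "("
  if ouvertePos = -1 then villeParen
  else
    let fermeePos := PySem.Str.find villeParen ")"
    if fermeePos < ouvertePos then villeParen
    else
      String.ofList (PySem.List.slice villeParen.toList none (some ouvertePos) ++
                     PySem.List.slice villeParen.toList (some (fermeePos + 1)) none)

-- ===== PRECONDITION & SPEC =====
def Spec_parentheseQuiFontChier (villeParen : String) (out : String) : Prop := out = parentheseQuiFontChier_alt villeParen
instance (villeParen : String) (out : String) : Decidable (Spec_parentheseQuiFontChier villeParen out) := by unfold Spec_parentheseQuiFontChier; infer_instance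

-- ===== CLAIM (what is proved, stated in full; the proofs are below) =====
def Claim_equal_parentheseQuiFontChier : Prop := ∀ (villeParen : String), Dom_parentheseQuiFontChier villeParen → Spec_parentheseQuiFontChier villeParen (parentheseQuiFontChier villeParen)

-- ===== LEMMAS AND PROOFS =====

-- when delRange is empty (fermeePos+1 ≤ ouvertePos) the loop keeps every character
theorem pvALoop_keep_all (a b : Int) (h : b + 1 ≤ a) (cs : List Char) :
    ∀ (pos : Nat) (acc : List Char),
      (cs.foldl (pvALoop a b) (acc, pos)).1 = acc ++ cs := by
  induction cs with
  | nil => intro pos acc; simp [List.foldl]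
  | cons c t ih =>
      intro pos acc
      have hc : ¬ (a ≤ (pos : Int) ∧ (pos : Int) < b + 1) := by omega
      simp only [List.foldl, pvALoop, if_pos hc]
      rw [ih]; simp

-- when 0 ≤ ouvertePos ≤ fermeePos+1 the loop keeps exactly the prefix before ouvertePos
-- and the suffix from fermeePos+1
theorem pvALoop_cut (a b : Int) (ha : 0 ≤ a) (hab : a ≤ b + 1) (cs : List Char) :
    ∀ (pos : Nat) (acc : List Char),
      (cs.foldl (pvALoop a b) (acc, pos)).1
        = acc ++ cs.take (a.toNat - pos) ++ cs.drop ((b + 1).toNat - pos) := by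
  induction cs with
  | nil => intro pos acc; simp [List.foldl]
  | cons c t ih =>
      intro pos acc
      by_cases hc : a ≤ (pos : Int) ∧ (pos : Int) < b + 1
      · -- dropped character: pos is inside delRange
        simp only [List.foldl, pvALoop, if_neg (not_not_intro hc)]
        rw [ih]
        have h1 : a.toNat - pos = 0 := by omega
        have h2 : a.toNat - (pos + 1) = 0 := by omega
        have h3 : (b + 1).toNat - pos = ((b + 1).toNat - (pos + 1)) + 1 := by omega
        rw [h1, h2, h3]; simp
      · -- kept character
        simp only [List.foldl, pvALoop, if_pos hc]
        rw [ih]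
        rcases Int.lt_or_le (pos : Int) a with hpa | hpa
        · -- before the opening parenthesis
          have h1 : a.toNat - pos = (a.toNat - (pos + 1)) + 1 := by omega
          have h2 : (b + 1).toNat - pos = ((b + 1).toNat - (pos + 1)) + 1 := by omega
          rw [h1, h2]; simp
        · -- after fermeePos (since pos not in range and a ≤ pos)
          have hbp : b + 1 ≤ (pos : Int) := by omega
          have h1 : a.toNat - pos = 0 := by omega
          have h2 : a.toNat - (pos + 1) = 0 := by omega
          have h3 : (b + 1).toNat - pos = 0 := by omega
          have h4 : (b + 1).toNat - (pos + 1) = 0 := by omega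
          rw [h1, h2, h3, h4]; simp

-- ===== VERDICT (by name: the statement is the Claim_ definition above) =====
theorem parentheseQuiFontChier_spec : Claim_equal_parentheseQuiFontChier := by
  intro villeParen _
  unfold Spec_parentheseQuiFontChier parentheseQuiFontChier parentheseQuiFontChier_alt
  set s := villeParen.toList with hs
  by_cases hin : PySem.Str.isIn "(" villeParen = true
  · -- '(' occurs: A runs its loop
    have hfind : PySem.Str.find villeParen "(" ≠ -1 := by
      rw [PySem.Str.find_ne_neg_one_iff]
      exact (PySem.Str.isIn_iff_infix _ _).mp hin
    have ha0 : 0 ≤ PySem.Str.find villeParen "(" := by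
      have := PySem.Chars.neg_one_le_find villeParen.toList "(".toList
      simp only [PySem.Str.find] at hfind ⊢
      omega
    simp only [hin, if_true, if_neg hfind]
    set a := PySem.Str.find villeParen "(" with hadef
    set b := PySem.Str.find villeParen ")" with hbdef
    by_cases hba : b < a
    · -- delRange empty: loop keeps everything, B returns the input unchanged
      rw [if_pos hba, pvALoop_keep_all a b (by omega) s 0 []]
      simp [hs]
    · -- a ≤ b: loop removes positions a..b
      rw [if_neg hba, pvALoop_cut a b ha0 (by omega) s 0 []]
      have hb1 : (0:Int) ≤ b + 1 := by omega
      rw [PySem.List.slice_to s ha0, PySem.List.slice_from s hb1]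
      simp
  · -- no '(' : both return the input unchanged
    have hfind : PySem.Str.find villeParen "(" = -1 := by
      rw [PySem.Str.find_eq_neg_one_iff]
      intro hinf
      exact hin ((PySem.Str.isIn_iff_infix _ _).mpr hinf)
    simp only [PySem.Str.find_eq, show "(".toList = ['('] from rfl] at hfind
    simp only [PySem.Str.isIn_eq] at hin
    simp at hin
    simp [hin, hfind]
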